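-- pv_equiv track=rewrite | github.com/katoge/AnonymousRepo | Table3/match_function_jsonl.py | choose_indices
-- ===== SOURCE A (Python) =====
-- from collections import Counter
--
-- def choose_indices(pairs, quota):
--     """
--     Decide which line indices to keep so that each function appears exactly
--     quota[func] times in the list.  Lines whose function is missing in quota
--     (i.e. not part of the intersection) are always discarded.
--     """
--     kept  = Counter()
--     idxs  = set()
--
--     for i, (_, func) in enumerate(pairs):
--         # DISCARD malformed lines or functions not in the intersection
--         if func is None or func not in quota:
--             continue
--         if kept[func] < quota[func]:
--             kept[func] += 1
--             idxs.add(i)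
--
--     return idxs
-- ===== SOURCE B (Python) =====
-- def choose_indices(pairs, quota):
--     """
--     Decide which line indices to keep so that each function appears exactly
--     quota[func] times in the list.  Lines whose function is missing in quota
--     (i.e. not part of the intersection) are always discarded.
--     """
--     # First pass: per-function occurrence rank of every line.
--     seen  = {}
--     ranks = []
--     for _, func in pairs:
--         r = seen.get(func, 0)
--         ranks.append(r)
--         seen[func] = r + 1
--     # Second pass: keep a line iff its occurrence rank is below the quota.
--     return {i for i, ((_, func), r) in enumerate(zip(pairs, ranks))
--             if func is not None and func in quota and r < quota[func]}
-- ===== Notes on version B (the rewrite author's own statement) =====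
-- stated objective: alternative
-- what changed: Replaces the single pass with a running kept-Counter by two passes: first compute each line's per-function occurrence rank into a list, then keep a line iff its rank is below the quota, so no counter state is consulted while selecting.
import Mathlib
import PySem

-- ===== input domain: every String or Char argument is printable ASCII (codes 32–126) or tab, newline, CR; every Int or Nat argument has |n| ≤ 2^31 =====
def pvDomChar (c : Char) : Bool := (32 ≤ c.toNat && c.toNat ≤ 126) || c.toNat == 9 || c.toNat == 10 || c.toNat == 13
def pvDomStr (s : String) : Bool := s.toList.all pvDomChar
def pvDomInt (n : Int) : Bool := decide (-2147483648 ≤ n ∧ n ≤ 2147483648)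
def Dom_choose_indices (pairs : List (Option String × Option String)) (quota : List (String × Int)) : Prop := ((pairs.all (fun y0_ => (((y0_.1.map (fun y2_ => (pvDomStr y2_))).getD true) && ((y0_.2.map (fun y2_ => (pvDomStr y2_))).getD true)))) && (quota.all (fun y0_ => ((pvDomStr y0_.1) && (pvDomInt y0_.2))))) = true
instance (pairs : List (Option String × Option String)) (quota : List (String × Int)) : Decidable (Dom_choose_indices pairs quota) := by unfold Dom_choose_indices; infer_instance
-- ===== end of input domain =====

-- B replaces A's single pass over a running kept-Counter by two passes (rank every line first,
-- then keep lines whose rank is below the quota); same cost, different decomposition.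

-- ===== PORT A =====
-- one loop iteration of A: skip None / not-in-quota funcs, else compare kept[func] < quota[func]
def pvAStep (qd : PySem.Dict String Int)
    (st : PySem.Dict String Int × PySem.Set Int)
    (p : Int × (Option String × Option String)) : PySem.Dict String Int × PySem.Set Int :=
  match p.2.2 with
  | none => st                                  -- func is None: continue
  | some func =>
    match qd.get? func with
    | none => st                                -- func not in quota: continue
    | some q =>
      if st.1.getD func 0 < q then              -- kept[func] < quota[func]
        (st.1.modify func 0 (· + 1), PySem.Set.add st.2 p.1)
      else st

def choose_indices (pairs : List (Option String × Option String)) (quota : List (String × Int)) : List Int :=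
  ((PySem.List.enumerate pairs 0).foldl (pvAStep (PySem.Dict.mk quota))
    (PySem.Dict.empty, PySem.Set.empty)).2

-- ===== PORT B =====
-- first pass of B: seen-dict + ranks list (r = seen.get(func, 0); ranks.append(r); seen[func] = r + 1)
def pvRankStep (st : PySem.Dict (Option String) Int × List Int)
    (p : Option String × Option String) : PySem.Dict (Option String) Int × List Int :=
  let r := st.1.getD p.2 0
  (st.1.insert p.2 (r + 1), st.2 ++ [r])

-- the comprehension's filter: func is not None and func in quota and r < quota[func]
def pvKeep (qd : PySem.Dict String Int)
    (e : Int × ((Option String × Option String) × Int)) : Option Int :=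
  match e.2.1.2 with
  | none => none
  | some func =>
    match qd.get? func with
    | none => none
    | some q => if e.2.2 < q then some e.1 else none

def choose_indices_alt (pairs : List (Option String × Option String)) (quota : List (String × Int)) : List Int :=
  let qd := PySem.Dict.mk quota
  let ranks := (pairs.foldl pvRankStep (PySem.Dict.empty, [])).2
  PySem.Set.ofList ((PySem.List.enumerate (pairs.zip ranks) 0).filterMap (pvKeep qd))

-- ===== PRECONDITION & SPEC =====
def Spec_choose_indices (pairs : List (Option String × Option String)) (quota : List (String × Int)) (out : List Int) : Prop := out = choose_indices_alt pairs quota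
instance (pairs : List (Option String × Option String)) (quota : List (String × Int)) (out : List Int) : Decidable (Spec_choose_indices pairs quota out) := by unfold Spec_choose_indices; infer_instance

-- ===== CLAIM (what is proved, stated in full; the proofs are below) =====
def Claim_equal_choose_indices : Prop := ∀ (pairs : List (Option String × Option String)) (quota : List (String × Int)), Dom_choose_indices pairs quota → Spec_choose_indices pairs quota (choose_indices pairs quota)

-- ===== LEMMAS AND PROOFS =====

-- the rank list B's first pass produces, written recursively for induction
def pvRanksOf (seen : PySem.Dict (Option String) Int)
    : List (Option String × Option String) → List Int
  | [] => []
  | p :: l => seen.getD p.2 0 :: pvRanksOf (seen.insert p.2 (seen.getD p.2 0 + 1)) l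

lemma pvRankStep_foldl (l : List (Option String × Option String))
    (seen : PySem.Dict (Option String) Int) (rs : List Int) :
    (l.foldl pvRankStep (seen, rs)).2 = rs ++ pvRanksOf seen l := by
  induction l generalizing seen rs with
  | nil => simp [pvRanksOf]
  | cons p l ih => simp [pvRankStep, pvRanksOf, ih, List.append_assoc]

lemma pv_main (qd : PySem.Dict String Int)
    (l : List (Option String × Option String))
    (seen : PySem.Dict (Option String) Int)
    (kept : PySem.Dict String Int) (acc : PySem.Set Int) (i0 : Int)
    (hinv : ∀ f q, qd.get? f = some q →
      kept.getD f 0 = min (seen.getD (some f) 0) (max q 0))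
    (hpos : ∀ k, 0 ≤ seen.getD k 0)
    (hfresh : ∀ x ∈ acc, x < i0) :
    ((PySem.List.enumerate l i0).foldl (pvAStep qd) (kept, acc)).2 =
      acc ++ (PySem.List.enumerate (l.zip (pvRanksOf seen l)) i0).filterMap (pvKeep qd) := by
  induction l generalizing seen kept acc i0 with
  | nil => simp [pvRanksOf]
  | cons p l ih =>
    obtain ⟨a, fo⟩ := p
    rw [show pvRanksOf seen ((a, fo) :: l) =
        seen.getD fo 0 :: pvRanksOf (seen.insert fo (seen.getD fo 0 + 1)) l from rfl]
    rw [PySem.List.enumerate_cons, List.zip_cons_cons, PySem.List.enumerate_cons,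
        List.filterMap_cons, List.foldl_cons]
    have hpos' : ∀ k, 0 ≤ (seen.insert fo (seen.getD fo 0 + 1)).getD k 0 := by
      intro k
      rw [PySem.Dict.getD_insert]
      split_ifs with hk
      · have := hpos fo; omega
      · exact hpos k
    cases fo with
    | none =>
      rw [show pvAStep qd (kept, acc) (i0, (a, none)) = (kept, acc) from rfl,
          show pvKeep qd (i0, ((a, none), seen.getD none 0)) = none from rfl]
      refine ih _ _ _ _ (fun f q hq => ?_) hpos' (fun x hx => by have := hfresh x hx; omega)
      rw [PySem.Dict.getD_insert_of_ne _ _ _ (by simp : (some f : Option String) ≠ none)]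
      exact hinv f q hq
    | some func =>
      have hinv' : ∀ f q, qd.get? f = some q → f ≠ func →
          kept.getD f 0 = min ((seen.insert (some func) (seen.getD (some func) 0 + 1)).getD (some f) 0) (max q 0) := by
        intro f q hq hne
        rw [PySem.Dict.getD_insert_of_ne _ _ _ (by simp [hne] : (some f : Option String) ≠ some func)]
        exact hinv f q hq
      cases hq : qd.get? func with
      | none =>
        rw [show pvAStep qd (kept, acc) (i0, (a, some func)) = (kept, acc) by
              simp [pvAStep, hq],
            show pvKeep qd (i0, ((a, some func), seen.getD (some func) 0)) = none by
              simp [pvKeep, hq]]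
        refine ih _ _ _ _ (fun f q hq' => ?_) hpos' (fun x hx => by have := hfresh x hx; omega)
        exact hinv' f q hq' (fun h => by rw [h] at hq'; rw [hq'] at hq; cases hq)
      | some q =>
        have hr0 : 0 ≤ seen.getD (some func) 0 := hpos (some func)
        have hk0 : kept.getD func 0 = min (seen.getD (some func) 0) (max q 0) := hinv func q hq
        by_cases hr : seen.getD (some func) 0 < q
        · -- kept this line
          have hcond : kept.getD func 0 < q := by omega
          have hstep : pvAStep qd (kept, acc) (i0, (a, some func)) =
              (kept.modify func 0 (· + 1), PySem.Set.add acc i0) := by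
            simp [pvAStep, hq, hcond]
          have hadd : PySem.Set.add acc i0 = acc ++ [i0] := by
            have : i0 ∉ acc := fun h => absurd (hfresh i0 h) (by omega)
            simp [PySem.Set.add, this]
          rw [hstep, hadd,
              show pvKeep qd (i0, ((a, some func), seen.getD (some func) 0)) = some i0 by
                simp [pvKeep, hq, hr]]
          rw [ih _ _ _ _ ?_ hpos' ?_]
          · simp
          · intro f q' hq'
            by_cases hne : f = func
            · subst hne
              rw [hq'] at hq; cases hq
              rw [PySem.Dict.getD_modify_self, PySem.Dict.getD_insert_self, hk0]
              omega
            · rw [PySem.Dict.getD_modify, if_neg hne]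
              exact hinv' f q' hq' hne
          · intro x hx
            rcases List.mem_append.1 hx with h | h
            · have := hfresh x h; omega
            · simp at h; omega
        · -- skipped: quota already reached (or nonpositive)
          have hcond : ¬ kept.getD func 0 < q := by omega
          rw [show pvAStep qd (kept, acc) (i0, (a, some func)) = (kept, acc) by
                simp [pvAStep, hq, hcond],
              show pvKeep qd (i0, ((a, some func), seen.getD (some func) 0)) = none by
                simp [pvKeep, hq, hr]]
          refine ih _ _ _ _ (fun f q' hq' => ?_) hpos' (fun x hx => by have := hfresh x hx; omega)
          by_cases hne : f = func
          · subst hne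
            rw [hq'] at hq; cases hq
            rw [PySem.Dict.getD_insert_self, hk0]
            omega
          · exact hinv' f q' hq' hne

lemma pv_keep_fst (qd : PySem.Dict String Int)
    (e : Int × ((Option String × Option String) × Int)) (v : Int)
    (h : pvKeep qd e = some v) : v = e.1 := by
  unfold pvKeep at h
  split at h
  · cases h
  · split at h
    · cases h
    · split at h
      · cases h; rfl
      · cases h

theorem choose_indices_spec : Claim_equal_choose_indices := by
  intro pairs quota _
  unfold Spec_choose_indices choose_indices choose_indices_alt
  rw [pvRankStep_foldl]
  simp only [List.nil_append]
  rw [pv_main (PySem.Dict.mk quota) pairs PySem.Dict.empty PySem.Dict.empty PySem.Set.empty 0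
      (fun f q _ => by simp [PySem.Dict.getD_empty])
      (fun k => by simp [PySem.Dict.getD_empty])
      (fun x hx => by cases hx)]
  refine (PySem.Set.ofList_eq_self_of_nodup _ ?_).symm
  have hpw : ∀ (xs : List ((Option String × Option String) × Int)),
      ((PySem.List.enumerate xs 0).filterMap (pvKeep (PySem.Dict.mk quota))).Pairwise (· < ·) := by
    intro xs
    rw [List.pairwise_filterMap]
    exact (PySem.List.pairwise_lt_enumerate _ _).imp (by
      intro p q hpq x hx y hy
      rw [pv_keep_fst _ _ _ hx, pv_keep_fst _ _ _ hy]; exact hpq)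
  simpa [PySem.Set.empty] using ((hpw _).imp (fun {a b} => ne_of_lt))
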